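-- pv_equiv track=rewrite | github.com/Twhart28/Blood_Pressure_Varibility | ARV calc.py | _find_comment_index
-- ===== SOURCE A (Python) =====
-- from typing import Dict, Any, Optional, Tuple, List
--
-- def _find_comment_index(comments, text: str, find_last: bool = False) -> Optional[int]:
--     if not comments:
--         return None
--     needle = text.lower()
--     indices = range(len(comments) - 1, -1, -1) if find_last else range(len(comments))
--     for idx in indices:
--         comment = comments[idx]
--         if comment is None:
--             continue
--         if needle in str(comment).lower():
--             return idx
--     return None
-- ===== SOURCE B (Python) =====
-- def _find_comment_index(comments, text: str, find_last: bool = False):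
--     if not comments:
--         return None
--     needle = text.lower()
--     matches = [i for i, comment in enumerate(comments)
--                if comment is not None and needle in str(comment).lower()]
--     if not matches:
--         return None
--     return matches[-1] if find_last else matches[0]
-- ===== Notes on version B (the rewrite author's own statement) =====
-- stated objective: simpler
-- what changed: Replaces the direction-dependent forward/reversed index range with an early-returning scan by a single forward enumerate pass that collects all matching indices and then picks the first or last endpoint.
import Mathlib
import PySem

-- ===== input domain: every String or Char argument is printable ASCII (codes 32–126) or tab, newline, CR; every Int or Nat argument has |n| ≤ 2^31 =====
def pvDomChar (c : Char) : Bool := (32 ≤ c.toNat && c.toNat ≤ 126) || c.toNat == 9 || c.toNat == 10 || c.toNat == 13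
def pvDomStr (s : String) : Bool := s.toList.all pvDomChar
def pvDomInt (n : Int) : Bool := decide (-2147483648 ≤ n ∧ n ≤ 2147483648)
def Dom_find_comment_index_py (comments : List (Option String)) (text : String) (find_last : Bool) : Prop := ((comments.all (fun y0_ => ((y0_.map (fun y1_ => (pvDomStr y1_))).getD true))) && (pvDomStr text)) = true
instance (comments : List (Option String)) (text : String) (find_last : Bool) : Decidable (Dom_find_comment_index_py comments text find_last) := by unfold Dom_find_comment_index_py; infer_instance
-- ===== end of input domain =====

-- ===== PORT A =====
-- A scans a forward or reversed index range and returns at the first match.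
def pvA_loop (comments : List (Option String)) (needle : String) : List Int → Option Int
  | [] => none
  | idx :: rest =>
    match PySem.List.pyGet? comments idx with
    | none => none        -- IndexError (unreachable: indices come from range(len))
    | some none => pvA_loop comments needle rest
    | some (some c) =>
      if PySem.Str.isIn needle (PySem.Str.lower c) then some idx
      else pvA_loop comments needle rest

def find_comment_index_py (comments : List (Option String)) (text : String) (find_last : Bool) : Option Int :=
  if comments = [] then none
  else
    let needle := PySem.Str.lower text
    let indices := if find_last then PySem.List.pyRange ((comments.length : Int) - 1) (-1) (-1)
                   else PySem.List.pyRange 0 (comments.length : Int) 1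
    pvA_loop comments needle indices

-- ===== PORT B =====
-- B: one forward enumerate pass collecting all matching indices, then pick an endpoint.
def find_comment_index_py_alt (comments : List (Option String)) (text : String) (find_last : Bool) : Option Int :=
  if comments = [] then none
  else
    let needle := PySem.Str.lower text
    let ms := (PySem.List.enumerate comments).filterMap
      (fun p => match p.2 with
        | none => none
        | some c => if PySem.Str.isIn needle (PySem.Str.lower c) then some p.1 else none)
    if ms = [] then none
    else if find_last then ms.getLast? else ms.head?

-- ===== PRECONDITION & SPEC =====
def Spec_find_comment_index_py (comments : List (Option String)) (text : String) (find_last : Bool) (out : Option Int) : Prop := out = find_comment_index_py_alt comments text find_last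
instance (comments : List (Option String)) (text : String) (find_last : Bool) (out : Option Int) : Decidable (Spec_find_comment_index_py comments text find_last out) := by unfold Spec_find_comment_index_py; infer_instance

-- ===== CLAIM (what is proved, stated in full; the proofs are below) =====
def Claim_equal_find_comment_index_py : Prop := ∀ (comments : List (Option String)) (text : String) (find_last : Bool), Dom_find_comment_index_py comments text find_last → Spec_find_comment_index_py comments text find_last (find_comment_index_py comments text find_last)

-- ===== LEMMAS AND PROOFS =====

-- the per-index match test A's loop applies
def pvTest (comments : List (Option String)) (needle : String) (i : Int) : Bool :=
  match PySem.List.pyGet? comments i with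
  | some (some c) => PySem.Str.isIn needle (PySem.Str.lower c)
  | _ => false

-- the filterMap function of B's enumerate pass
def pvF (needle : String) : Int × Option String → Option Int := fun p =>
  match p.2 with
  | none => none
  | some c => if PySem.Str.isIn needle (PySem.Str.lower c) then some p.1 else none

lemma pvA_loop_eq_filter_head (comments : List (Option String)) (needle : String)
    (l : List Int) (h : ∀ i ∈ l, (PySem.List.pyGet? comments i).isSome) :
    pvA_loop comments needle l = (l.filter (pvTest comments needle)).head? := by
  induction l with
  | nil => simp [pvA_loop]
  | cons i rest ih =>
    have hi := h i (List.mem_cons_self ..)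
    have hrest : ∀ j ∈ rest, (PySem.List.pyGet? comments j).isSome :=
      fun j hj => h j (List.mem_cons_of_mem _ hj)
    cases hg : PySem.List.pyGet? comments i with
    | none => simp [hg] at hi
    | some c =>
      cases c with
      | none => simp [pvA_loop, hg, List.filter_cons, pvTest, ih hrest]
      | some s =>
        by_cases hin : PySem.Chars.isIn needle.toList (PySem.Chars.lower s.toList) = true <;>
          simp [pvA_loop, hg, List.filter_cons, pvTest, hin, ih hrest]

-- core: the filtered forward index range IS B's enumerate pass
lemma pvCore (needle : String) (xs pre : List (Option String)) :
    (PySem.List.pyRange (pre.length : Int) ((pre.length : Int) + (xs.length : Int)) 1).filter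
        (pvTest (pre ++ xs) needle)
      = (PySem.List.enumerate xs (pre.length : Int)).filterMap (pvF needle) := by
  induction xs generalizing pre with
  | nil => simp [PySem.List.enumerate_nil, PySem.List.pyRange_one_eq_nil]
  | cons x rest ih =>
    have hlt : (pre.length : Int) < (pre.length : Int) + ((x :: rest).length : Int) := by
      simp only [List.length_cons]; push_cast; omega
    rw [PySem.List.pyRange_one_cons hlt, List.filter_cons, PySem.List.enumerate_cons]
    have hget : PySem.List.pyGet? (pre ++ x :: rest) (pre.length : Int) = some x :=
      PySem.List.pyGet?_append_length ..
    have htest : pvTest (pre ++ x :: rest) needle (pre.length : Int)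
        = (match x with
           | none => false
           | some c => PySem.Str.isIn needle (PySem.Str.lower c)) := by
      cases x <;> simp [pvTest, hget]
    have hstep := ih (pre ++ [x])
    have hlen : ((pre ++ [x]).length : Int) = (pre.length : Int) + 1 := by simp
    rw [hlen] at hstep
    have harg : (pre.length : Int) + ((x :: rest).length : Int)
        = (pre.length : Int) + 1 + (rest.length : Int) := by
      simp only [List.length_cons]; push_cast; omega
    rw [harg]
    have hassoc : (pre ++ [x]) ++ rest = pre ++ x :: rest := by simp
    rw [hassoc] at hstep
    cases x with
    | none => simp [htest, List.filterMap_cons, pvF, hstep]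
    | some c =>
      by_cases hin : PySem.Chars.isIn needle.toList (PySem.Chars.lower c.toList) = true <;>
        simp [htest, hin, List.filterMap_cons, pvF, hstep]

lemma pvCore0 (needle : String) (xs : List (Option String)) :
    (PySem.List.pyRange 0 (xs.length : Int) 1).filter (pvTest xs needle)
      = (PySem.List.enumerate xs 0).filterMap (pvF needle) := by
  have h := pvCore needle xs []
  simpa using h

lemma pvInRange (comments : List (Option String)) (i : Int)
    (h : i ∈ PySem.List.pyRange 0 (comments.length : Int) 1) :
    (PySem.List.pyGet? comments i).isSome := by
  rw [PySem.List.mem_pyRange_one] at h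
  rw [Option.isSome_iff_ne_none]
  intro hnone
  rw [PySem.List.pyGet?_eq_none_iff] at hnone
  exact hnone ⟨by omega, h.2⟩

-- ===== VERDICT (by name: the statement is the Claim_ definition above) =====
theorem find_comment_index_py_spec : Claim_equal_find_comment_index_py := by
  intro comments text find_last _
  unfold Spec_find_comment_index_py find_comment_index_py find_comment_index_py_alt
  by_cases hnil : comments = []
  · simp [hnil]
  · simp only [if_neg hnil]
    set needle := PySem.Str.lower text with hneedle
    have hM : (PySem.List.enumerate comments 0).filterMap (pvF needle)
        = (PySem.List.pyRange 0 (comments.length : Int) 1).filter (pvTest comments needle) :=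
      (pvCore0 needle comments).symm
    have hBfun : (fun p : Int × Option String =>
        match p.2 with
        | none => none
        | some c => if PySem.Str.isIn needle (PySem.Str.lower c) then some p.1 else none)
        = pvF needle := rfl
    cases find_last with
    | false =>
      simp only [if_false, Bool.false_eq_true, hBfun]
      rw [pvA_loop_eq_filter_head comments needle _ (fun i hi => pvInRange comments i hi),
        pvCore0 needle comments]
      cases hc : (PySem.List.enumerate comments 0).filterMap (pvF needle) <;> simp [hc]
    | true =>
      simp only [if_true, hBfun]
      have hrev : PySem.List.pyRange ((comments.length : Int) - 1) (-1) (-1)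
          = (PySem.List.pyRange 0 (comments.length : Int) 1).reverse := by
        have := PySem.List.pyRange_neg_one_eq_reverse ((comments.length : Int) - 1) (-1)
        simpa using this
      rw [hrev]
      rw [pvA_loop_eq_filter_head comments needle _
        (fun i hi => pvInRange comments i (by simpa using (List.mem_reverse.mp hi)))]
      rw [List.filter_reverse, List.head?_reverse, pvCore0 needle comments]
      cases hc : (PySem.List.enumerate comments 0).filterMap (pvF needle) <;> simp [hc]
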